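-- pv_equiv track=rewrite | github.com/dhammanana/epitaka.org | translate.py | chunk_sentences
-- ===== SOURCE A (Python) =====
-- def chunk_sentences(sentences, max_chunk_size=1500):  # Reduced chunk size
--     chunks = []
--     current_chunk = []
--     current_size = 0
--     current_book_id = None
--     chunk_id = 1
--
--     for book_id, para_id, line_id, pali_sentence in sentences:
--         sentence_size = len(pali_sentence)
--         if current_book_id != book_id or current_size + sentence_size > max_chunk_size:
--             if current_chunk:
--                 chunks.append((chunk_id, current_book_id, current_chunk))
--                 chunk_id += 1
--             current_chunk = []
--             current_size = 0
--             current_book_id = book_id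
--         current_chunk.append((para_id, line_id, pali_sentence))
--         current_size += sentence_size
--
--     if current_chunk:
--         chunks.append((chunk_id, current_book_id, current_chunk))
--
--     return chunks
-- ===== SOURCE B (Python) =====
-- def _take_chunk(sentences, max_chunk_size):
--     """Cut the maximal greedy chunk off the front; return (book_id, chunk, rest)."""
--     book_id, para_id, line_id, pali = sentences[0]
--     chunk = [(para_id, line_id, pali)]
--     size = len(pali)
--     i = 1
--     while i < len(sentences):
--         b, p, l, s = sentences[i]
--         if b != book_id or size + len(s) > max_chunk_size:
--             break
--         chunk.append((p, l, s))
--         size += len(s)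
--         i += 1
--     return book_id, chunk, sentences[i:]
--
--
-- def chunk_sentences(sentences, max_chunk_size=1500):  # Reduced chunk size
--     pieces = []
--     rest = sentences
--     while rest:
--         book_id, chunk, rest = _take_chunk(rest, max_chunk_size)
--         pieces.append((book_id, chunk))
--     return [(i, b, c) for i, (b, c) in enumerate(pieces, 1)]
-- ===== Notes on version B (the rewrite author's own statement) =====
-- stated objective: alternative
-- what changed: B replaces A's single-pass state machine (chunks/current_chunk/current_size/current_book_id/chunk_id threaded through one loop) with a two-stage cut-then-number design: repeatedly slice the maximal greedy same-book size-bounded prefix off the front into unnumbered (book, chunk) pieces, then assign chunk ids afterwards with enumerate.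
import Mathlib
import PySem

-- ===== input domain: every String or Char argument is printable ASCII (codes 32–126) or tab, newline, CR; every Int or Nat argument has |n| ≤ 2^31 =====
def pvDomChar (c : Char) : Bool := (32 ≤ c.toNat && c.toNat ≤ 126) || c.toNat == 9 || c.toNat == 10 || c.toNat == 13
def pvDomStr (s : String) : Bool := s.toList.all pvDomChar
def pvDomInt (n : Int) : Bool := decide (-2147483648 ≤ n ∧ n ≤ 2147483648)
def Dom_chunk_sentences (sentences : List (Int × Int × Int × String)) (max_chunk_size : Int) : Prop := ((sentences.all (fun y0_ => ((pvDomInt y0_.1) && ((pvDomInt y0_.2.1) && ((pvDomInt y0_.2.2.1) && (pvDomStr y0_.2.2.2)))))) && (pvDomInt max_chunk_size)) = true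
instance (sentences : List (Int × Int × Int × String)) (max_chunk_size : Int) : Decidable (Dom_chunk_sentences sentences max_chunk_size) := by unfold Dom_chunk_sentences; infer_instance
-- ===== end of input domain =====

-- B replaces A's single-pass state machine with a two-stage cut-then-number design:
-- repeatedly cut the maximal greedy same-book size-bounded prefix into (book, chunk) pieces,
-- then number them with enumerate (objective: alternative; same O(n) cost).

-- ===== PORT A =====
-- A's loop body; state = (chunks, current_chunk, current_size, current_book_id, chunk_id).
-- current_book_id is Python's possibly-None variable, hence Option Int; the `.getD 0` below is
-- never reached with `none` because current_chunk is empty whenever current_book_id is None.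
def chunkStepA (maxc : Int)
    (st : List (Int × Int × List (Int × Int × String)) × List (Int × Int × String) × Int × Option Int × Int)
    (s : Int × Int × Int × String) :
    List (Int × Int × List (Int × Int × String)) × List (Int × Int × String) × Int × Option Int × Int :=
  let (chunks, cur, size, cbid, cid) := st
  let (b, p, l, pali) := s
  let ssize : Int := PySem.Str.len pali
  if cbid ≠ some b ∨ size + ssize > maxc then
    if cur ≠ [] then
      (chunks ++ [(cid, cbid.getD 0, cur)], [(p, l, pali)], ssize, some b, cid + 1)
    else
      (chunks, [(p, l, pali)], ssize, some b, cid)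
  else
    (chunks, cur ++ [(p, l, pali)], size + ssize, cbid, cid)

def chunk_sentences (sentences : List (Int × Int × Int × String)) (max_chunk_size : Int) : List (Int × Int × (List (Int × Int × String))) :=
  let st := sentences.foldl (chunkStepA max_chunk_size) ([], [], 0, none, 1)
  let (chunks, cur, _, cbid, cid) := st
  if cur ≠ [] then chunks ++ [(cid, cbid.getD 0, cur)] else chunks

-- ===== PORT B =====
-- _take_chunk's while loop (Source B walks an index i and slices sentences[i:]; here the same walk
-- is the structural recursion on the not-yet-consumed suffix, which IS sentences[i:]).
-- State = (chunk, size); returns (chunk, rest).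
def takeChunkLoop (maxc b : Int) (chunk : List (Int × Int × String)) (size : Int) :
    List (Int × Int × Int × String) → List (Int × Int × String) × List (Int × Int × Int × String)
  | [] => (chunk, [])
  | y :: t =>
    let (yb, yp, yl, ys) := y
    if yb ≠ b ∨ size + PySem.Str.len ys > maxc then (chunk, y :: t)
    else takeChunkLoop maxc b (chunk ++ [(yp, yl, ys)]) (size + PySem.Str.len ys) t

-- rest is never longer than the input (needed for piecesOf's termination)
theorem takeChunkLoop_rest_le (maxc b : Int) :
    ∀ (ys : List (Int × Int × Int × String)) (chunk : List (Int × Int × String)) (size : Int),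
      (takeChunkLoop maxc b chunk size ys).2.length ≤ ys.length := by
  intro ys
  induction ys with
  | nil => intro chunk size; simp [takeChunkLoop]
  | cons y t ih =>
    intro chunk size
    obtain ⟨yb, yp, yl, ys'⟩ := y
    simp only [takeChunkLoop]
    split
    · simp
    · exact Nat.le_succ_of_le (ih _ _)

-- the while loop of chunk_sentences in Source B: collect the unnumbered (book_id, chunk) pieces
def piecesOf (maxc : Int) : List (Int × Int × Int × String) → List (Int × List (Int × Int × String))
  | [] => []
  | x :: rest =>
    let res := takeChunkLoop maxc x.1 [(x.2.1, x.2.2.1, x.2.2.2)] (PySem.Str.len x.2.2.2) rest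
    (x.1, res.1) :: piecesOf maxc res.2
termination_by xs => xs.length
decreasing_by
  exact Nat.lt_succ_of_le (takeChunkLoop_rest_le _ _ _ _ _)

def chunk_sentences_alt (sentences : List (Int × Int × Int × String)) (max_chunk_size : Int) : List (Int × Int × (List (Int × Int × String))) :=
  (PySem.List.enumerate (piecesOf max_chunk_size sentences) 1).map
    (fun ibc => (ibc.1, ibc.2.1, ibc.2.2))

-- ===== PRECONDITION & SPEC =====
def Spec_chunk_sentences (sentences : List (Int × Int × Int × String)) (max_chunk_size : Int) (out : List (Int × Int × (List (Int × Int × String)))) : Prop := out = chunk_sentences_alt sentences max_chunk_size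
instance (sentences : List (Int × Int × Int × String)) (max_chunk_size : Int) (out : List (Int × Int × (List (Int × Int × String)))) : Decidable (Spec_chunk_sentences sentences max_chunk_size out) := by unfold Spec_chunk_sentences; infer_instance

-- ===== CLAIM =====
def Claim_equal_chunk_sentences : Prop := ∀ (sentences : List (Int × Int × Int × String)) (max_chunk_size : Int), Dom_chunk_sentences sentences max_chunk_size → Spec_chunk_sentences sentences max_chunk_size (chunk_sentences sentences max_chunk_size)

-- ===== LEMMAS AND PROOFS =====

-- A's closing flush, as a function of the final state.
def finishA (st : List (Int × Int × List (Int × Int × String)) × List (Int × Int × String) × Int × Option Int × Int) :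
    List (Int × Int × List (Int × Int × String)) :=
  if st.2.1 ≠ [] then st.1 ++ [(st.2.2.2.2, st.2.2.2.1.getD 0, st.2.1)] else st.1

-- "rest of A" from a fresh current_chunk.
def aRest (maxc : Int) (xs : List (Int × Int × Int × String))
    (chunks : List (Int × Int × List (Int × Int × String))) (cbid : Option Int) (cid : Int) :
    List (Int × Int × List (Int × Int × String)) :=
  finishA (xs.foldl (chunkStepA maxc) (chunks, [], 0, cbid, cid))

-- numbering of pieces starting at cid (proof-side recursion equal to B's enumerate+map)
def numberFrom (cid : Int) : List (Int × List (Int × Int × String)) → List (Int × Int × List (Int × Int × String))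
  | [] => []
  | (b, c) :: ps => (cid, b, c) :: numberFrom (cid + 1) ps

theorem enumerate_map_eq_numberFrom :
    ∀ (ps : List (Int × List (Int × Int × String))) (cid : Int),
      (PySem.List.enumerate ps cid).map (fun ibc => (ibc.1, ibc.2.1, ibc.2.2)) = numberFrom cid ps := by
  intro ps
  induction ps with
  | nil => intro cid; simp [numberFrom, PySem.List.enumerate_nil]
  | cons p ps ih =>
    intro cid
    obtain ⟨b, c⟩ := p
    rw [PySem.List.enumerate_cons]
    simp only [List.map_cons, numberFrom]
    rw [ih]

-- from a fresh (empty) current_chunk, A's first step is uniform in the tracked book id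
theorem stepA_fresh (maxc : Int) (chunks : List (Int × Int × List (Int × Int × String)))
    (cbid : Option Int) (cid : Int) (b p l : Int) (s : String) :
    chunkStepA maxc (chunks, [], 0, cbid, cid) (b, p, l, s) =
      (chunks, [(p, l, s)], PySem.Str.len s, some b, cid) := by
  simp only [chunkStepA]
  split
  · simp
  · rename_i h
    push Not at h
    simp [h.1]

-- while current_chunk is nonempty and the tracked book is b, A's loop consumes exactly the
-- sentences _take_chunk consumes, then flushes and continues fresh
theorem inner (maxc b : Int) :
    ∀ (ys : List (Int × Int × Int × String)) (chunks : List (Int × Int × List (Int × Int × String)))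
      (cur : List (Int × Int × String)) (size cid : Int), cur ≠ [] →
      finishA (ys.foldl (chunkStepA maxc) (chunks, cur, size, some b, cid)) =
        aRest maxc (takeChunkLoop maxc b cur size ys).2
          (chunks ++ [(cid, b, (takeChunkLoop maxc b cur size ys).1)]) (some b) (cid + 1) := by
  intro ys
  induction ys with
  | nil =>
    intro chunks cur size cid hcur
    simp [takeChunkLoop, aRest, finishA, hcur]
  | cons y t ih =>
    intro chunks cur size cid hcur
    obtain ⟨yb, yp, yl, ys'⟩ := y
    by_cases hbrk : yb ≠ b ∨ size + PySem.Str.len ys' > maxc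
    · -- break: A flushes and restarts on (y :: t); B's loop stops here
      have eA : chunkStepA maxc (chunks, cur, size, some b, cid) (yb, yp, yl, ys') =
          (chunks ++ [(cid, b, cur)], [(yp, yl, ys')], PySem.Str.len ys', some yb, cid + 1) := by
        simp only [chunkStepA]
        rw [if_pos]
        · simp [hcur]
        · rcases hbrk with h | h
          · exact Or.inl (by simpa using Ne.symm h)
          · exact Or.inr h
      have eL : takeChunkLoop maxc b cur size ((yb, yp, yl, ys') :: t) = (cur, (yb, yp, yl, ys') :: t) := by
        simp only [takeChunkLoop]
        rw [if_pos hbrk]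
      rw [eL]
      simp only [List.foldl_cons, eA]
      unfold aRest
      rw [List.foldl_cons, stepA_fresh]
    · -- fits: both append
      push Not at hbrk
      obtain ⟨hb, hsz⟩ := hbrk
      subst hb
      have hsz' : ¬ maxc < size + (ys'.length : Int) := by
        simpa [PySem.Str.len] using not_lt.mpr hsz
      have eA : chunkStepA maxc (chunks, cur, size, some yb, cid) (yb, yp, yl, ys') =
          (chunks, cur ++ [(yp, yl, ys')], size + PySem.Str.len ys', some yb, cid) := by
        simp [chunkStepA, hsz']
      have eL : takeChunkLoop maxc yb cur size ((yb, yp, yl, ys') :: t) =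
          takeChunkLoop maxc yb (cur ++ [(yp, yl, ys')]) (size + PySem.Str.len ys') t := by
        simp [takeChunkLoop, hsz']
      rw [eL]
      simp only [List.foldl_cons, eA]
      exact ih _ _ _ _ (by simp)

-- main lemma: A's run from a fresh state is piecesOf, numbered from cid, appended to chunks
theorem main_eq (maxc : Int) (n : Nat) :
    ∀ (xs : List (Int × Int × Int × String)), xs.length ≤ n →
    ∀ (chunks : List (Int × Int × List (Int × Int × String))) (cbid : Option Int) (cid : Int),
      aRest maxc xs chunks cbid cid = chunks ++ numberFrom cid (piecesOf maxc xs) := by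
  induction n with
  | zero =>
    intro xs hlen chunks cbid cid
    have : xs = [] := List.length_eq_zero_iff.mp (Nat.le_zero.mp hlen)
    subst this
    simp [aRest, finishA, piecesOf, numberFrom]
  | succ n ih =>
    intro xs hlen chunks cbid cid
    match xs with
    | [] => simp [aRest, finishA, piecesOf, numberFrom]
    | ⟨b, p, l, s⟩ :: rest =>
      unfold aRest
      rw [List.foldl_cons, stepA_fresh]
      rw [inner maxc b rest chunks [(p, l, s)] (PySem.Str.len s) cid (by simp)]
      rw [ih _ (Nat.le_trans (takeChunkLoop_rest_le _ _ _ _ _) (Nat.le_of_succ_le_succ hlen))]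
      rw [show piecesOf maxc ((b, p, l, s) :: rest) =
          (b, (takeChunkLoop maxc b [(p, l, s)] (PySem.Str.len s) rest).1) ::
            piecesOf maxc (takeChunkLoop maxc b [(p, l, s)] (PySem.Str.len s) rest).2 from by
        rw [piecesOf]]
      simp [numberFrom]

-- ===== VERDICT =====
theorem chunk_sentences_spec : Claim_equal_chunk_sentences := by
  intro sentences maxc _
  unfold Spec_chunk_sentences
  have hA : chunk_sentences sentences maxc = aRest maxc sentences [] none 1 := by
    unfold chunk_sentences aRest finishA
    rcases sentences.foldl (chunkStepA maxc) ([], [], 0, none, 1) with ⟨c, cu, sz, cb, ci⟩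
    simp
  have hB : chunk_sentences_alt sentences maxc = numberFrom 1 (piecesOf maxc sentences) := by
    unfold chunk_sentences_alt
    exact enumerate_map_eq_numberFrom _ _
  rw [hA, hB, main_eq maxc sentences.length sentences (le_refl _) [] none 1]
  simp
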